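-- pv_equiv track=rewrite | github.com/jianershi/algorithm | 1879.1.py | find_next_bigger
-- ===== SOURCE A (Python) =====
-- def find_next_bigger(i, nums):
--     n = len(nums)
--     if not 0 <= i < n:
--         return -1
--     if nums[i] >= 0:
--         for j in range(i + 1, n):
--             if nums[j] >= 0:
--                 return j
--         return -1
--     elif nums[i] < 0:
--         for j in range(i - 1, -1, -1):
--             if nums[j] < 0:
--                 return j
--         for j in range(n):
--             if nums[j] >= 0:
--                 return j
--         return -1
-- ===== SOURCE B (Python) =====
-- def find_next_bigger(i, nums):
--     n = len(nums)
--     if not 0 <= i < n: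
--         return -1
--     first_pos = -1       # first index with a non-negative value
--     next_pos_after = -1  # first index > i with a non-negative value
--     last_neg_before = -1 # last index < i with a negative value
--     for j, v in enumerate(nums):
--         if v >= 0:
--             if first_pos == -1:
--                 first_pos = j
--             if j > i and next_pos_after == -1:
--                 next_pos_after = j
--         else:
--             if j < i:
--                 last_neg_before = j
--     if nums[i] >= 0:
--         return next_pos_after
--     return last_neg_before if last_neg_before != -1 else first_pos
-- ===== Notes on version B (the rewrite author's own statement) =====
-- stated objective: alternative
-- what changed: Replaces A's three directional early-exit scans by ONE forward pass over enumerate(nums) maintaining three accumulators (first non-negative index, first non-negative index after i, last negative index before i); the answer is then selected from these summaries.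
import Mathlib
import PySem

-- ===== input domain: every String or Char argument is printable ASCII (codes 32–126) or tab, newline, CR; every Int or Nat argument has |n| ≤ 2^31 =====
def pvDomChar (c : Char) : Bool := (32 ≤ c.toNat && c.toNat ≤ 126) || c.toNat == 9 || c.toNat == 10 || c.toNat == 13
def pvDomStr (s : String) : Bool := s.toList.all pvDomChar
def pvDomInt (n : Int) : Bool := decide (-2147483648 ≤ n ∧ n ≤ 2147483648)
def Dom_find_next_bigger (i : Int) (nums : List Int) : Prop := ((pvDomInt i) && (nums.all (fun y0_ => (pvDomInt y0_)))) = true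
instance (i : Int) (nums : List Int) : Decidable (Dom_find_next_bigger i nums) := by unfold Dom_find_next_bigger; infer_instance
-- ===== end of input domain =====

-- B replaces A's three directional early-exit scans by one forward pass over enumerate(nums)
-- with three accumulators, then selects the answer from those summaries; return value only.

-- ===== PORT A =====
-- A's forward loop: "for j in …: if nums[j] >= 0: return j" then "return -1"
def pvScanGE (nums : List Int) : List Int → Int
  | [] => -1
  | j :: rest => if 0 ≤ PySem.List.pyGetD nums j 0 then j else pvScanGE nums rest

-- A's backward loop: "for j in …: if nums[j] < 0: return j", falling through as none
def pvScanLT? (nums : List Int) : List Int → Option Int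
  | [] => none
  | j :: rest => if PySem.List.pyGetD nums j 0 < 0 then some j else pvScanLT? nums rest

def find_next_bigger (i : Int) (nums : List Int) : Int :=
  let n : Int := nums.length
  if ¬ (0 ≤ i ∧ i < n) then -1
  else if 0 ≤ PySem.List.pyGetD nums i 0 then
    pvScanGE nums (PySem.List.pyRange (i + 1) n 1)
  else
    match pvScanLT? nums (PySem.List.pyRange (i - 1) (-1) (-1)) with
    | some j => j
    | none => pvScanGE nums (PySem.List.pyRange 0 n 1)

-- ===== PORT B =====
-- one step of B's single pass: state = (first_pos, next_pos_after, last_neg_before)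
def pvStep (i : Int) (s : Int × Int × Int) (jv : Int × Int) : Int × Int × Int :=
  if 0 ≤ jv.2 then
    (if s.1 = -1 then jv.1 else s.1,
     if i < jv.1 ∧ s.2.1 = -1 then jv.1 else s.2.1,
     s.2.2)
  else
    (s.1, s.2.1, if jv.1 < i then jv.1 else s.2.2)

def find_next_bigger_alt (i : Int) (nums : List Int) : Int :=
  let n : Int := nums.length
  if ¬ (0 ≤ i ∧ i < n) then -1
  else
    let st := (PySem.List.enumerate nums).foldl (pvStep i) (-1, -1, -1)
    if 0 ≤ PySem.List.pyGetD nums i 0 then st.2.1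
    else if st.2.2 ≠ -1 then st.2.2 else st.1

-- ===== PRECONDITION & SPEC =====
def Spec_find_next_bigger (i : Int) (nums : List Int) (out : Int) : Prop := out = find_next_bigger_alt i nums
instance (i : Int) (nums : List Int) (out : Int) : Decidable (Spec_find_next_bigger i nums out) := by unfold Spec_find_next_bigger; infer_instance

-- ===== CLAIM (what is proved, stated in full; the proofs are below) =====
def Claim_equal_find_next_bigger : Prop := ∀ (i : Int) (nums : List Int), Dom_find_next_bigger i nums → Spec_find_next_bigger i nums (find_next_bigger i nums)

-- ===== LEMMAS AND PROOFS =====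

-- A's forward scan is the head of the filtered index list (else -1)
lemma pvScanGE_eq_filter_head (nums : List Int) (l : List Int) :
    pvScanGE nums l =
      (((l.filter (fun j => decide (0 ≤ PySem.List.pyGetD nums j 0))).head?).getD (-1)) := by
  induction l with
  | nil => rfl
  | cons j rest ih =>
    by_cases h : 0 ≤ PySem.List.pyGetD nums j 0 <;> simp [pvScanGE, h, ih]

-- A's backward scan is the head of the filtered index list
lemma pvScanLT?_eq_filter_head (nums : List Int) (l : List Int) :
    pvScanLT? nums l = (l.filter (fun j => decide (PySem.List.pyGetD nums j 0 < 0))).head? := by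
  induction l with
  | nil => rfl
  | cons j rest ih =>
    by_cases h : PySem.List.pyGetD nums j 0 < 0 <;> simp [pvScanLT?, h, ih]

-- characterisation of B's single pass, for arbitrary accumulators; the indices in l
-- are nonnegative, so -1 is a sound "unset" sentinel
lemma pvFold_char (i : Int) (l : List (Int × Int)) (fp np ln : Int)
    (hl : ∀ p ∈ l, 0 ≤ p.1) :
    l.foldl (pvStep i) (fp, np, ln) =
      ((if fp = -1 then ((l.filter (fun p => decide (0 ≤ p.2))).head?.map Prod.fst).getD (-1) else fp),
       (if np = -1 then ((l.filter (fun p => decide (0 ≤ p.2) && decide (i < p.1))).head?.map Prod.fst).getD (-1) else np),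
       ((l.filter (fun p => decide (p.2 < 0) && decide (p.1 < i))).getLast?.map Prod.fst).getD ln) := by
  induction l generalizing fp np ln with
  | nil => simp
  | cons p rest ih =>
    have hp : 0 ≤ p.1 := hl p (List.mem_cons_self ..)
    have hrest : ∀ q ∈ rest, 0 ≤ q.1 := fun q hq => hl q (List.mem_cons_of_mem _ hq)
    have hpne : p.1 ≠ -1 := by omega
    by_cases hv : 0 ≤ p.2
    · have hstep : pvStep i (fp, np, ln) p =
          (if fp = -1 then p.1 else fp, if i < p.1 ∧ np = -1 then p.1 else np, ln) := by
        simp [pvStep, hv]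
      rw [List.foldl_cons, hstep, ih _ _ _ hrest]
      have hnv : ¬ (p.2 < 0) := by omega
      by_cases hfp : fp = -1 <;> by_cases hnp : np = -1 <;>
        by_cases hip : i < p.1 <;>
          simp [hfp, hnp, hip, hv, hnv, hpne]
    · have hstep : pvStep i (fp, np, ln) p =
          (fp, np, if p.1 < i then p.1 else ln) := by
        simp [pvStep, hv]
      rw [List.foldl_cons, hstep, ih _ _ _ hrest]
      have hnv : p.2 < 0 := by omega
      by_cases hpi : p.1 < i
      · simp only [hv, decide_false, Bool.false_and, hnv, decide_true, hpi, Bool.true_and,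
          List.filter_cons, if_true, if_false]
        congr 1
        congr 1
        rw [List.getLast?_cons]
        cases (rest.filter (fun p => decide (p.2 < 0) && decide (p.1 < i))).getLast? <;> simp
      · simp [hv, hnv, hpi]

-- B's "later" table over the whole range equals A's forward range, filtered
lemma pv_later_eq (nums : List Int) (i n : Int) (h0 : 0 ≤ i) (h1 : i < n) :
    (PySem.List.pyRange 0 n 1).filter
        (fun j => decide (0 ≤ PySem.List.pyGetD nums j 0) && decide (i < j)) =
      (PySem.List.pyRange (i + 1) n 1).filter (fun j => decide (0 ≤ PySem.List.pyGetD nums j 0)) := by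
  rw [PySem.List.pyRange_one_append 0 (i + 1) n (by omega) (by omega), List.filter_append]
  have h2 : (PySem.List.pyRange 0 (i + 1) 1).filter
      (fun j => decide (0 ≤ PySem.List.pyGetD nums j 0) && decide (i < j)) = [] := by
    apply List.filter_eq_nil_iff.mpr
    intro j hj
    have := PySem.List.mem_pyRange_one.mp hj
    simp only [Bool.and_eq_true, decide_eq_true_eq, not_and]
    intro _; omega
  have h3 : (PySem.List.pyRange (i + 1) n 1).filter
      (fun j => decide (0 ≤ PySem.List.pyGetD nums j 0) && decide (i < j)) =
      (PySem.List.pyRange (i + 1) n 1).filter (fun j => decide (0 ≤ PySem.List.pyGetD nums j 0)) := by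
    apply List.filter_congr
    intro j hj
    have hij := PySem.List.mem_pyRange_one.mp hj
    have hd : decide (i < j) = true := by simp only [decide_eq_true_eq]; omega
    rw [hd, Bool.and_true]
  rw [h2, h3, List.nil_append]

-- B's "earlier negative" table over the whole range equals the filter over range(i)
lemma pv_earlier_eq (nums : List Int) (i n : Int) (h0 : 0 ≤ i) (h1 : i ≤ n) :
    (PySem.List.pyRange 0 n 1).filter
        (fun j => decide (PySem.List.pyGetD nums j 0 < 0) && decide (j < i)) =
      (PySem.List.pyRange 0 i 1).filter (fun j => decide (PySem.List.pyGetD nums j 0 < 0)) := by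
  rw [PySem.List.pyRange_one_append 0 i n h0 h1, List.filter_append]
  have h2 : (PySem.List.pyRange i n 1).filter
      (fun j => decide (PySem.List.pyGetD nums j 0 < 0) && decide (j < i)) = [] := by
    apply List.filter_eq_nil_iff.mpr
    intro j hj
    have := PySem.List.mem_pyRange_one.mp hj
    simp only [Bool.and_eq_true, decide_eq_true_eq, not_and]
    intro _; omega
  have h3 : (PySem.List.pyRange 0 i 1).filter
      (fun j => decide (PySem.List.pyGetD nums j 0 < 0) && decide (j < i)) =
      (PySem.List.pyRange 0 i 1).filter (fun j => decide (PySem.List.pyGetD nums j 0 < 0)) := by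
    apply List.filter_congr
    intro j hj
    have hij := PySem.List.mem_pyRange_one.mp hj
    have hd : decide (j < i) = true := by simp only [decide_eq_true_eq]; omega
    rw [hd, Bool.and_true]
  rw [h2, h3, List.append_nil]

-- A's countdown range is the reverse of range(i)
lemma pv_countdown_eq (i : Int) :
    PySem.List.pyRange (i - 1) (-1) (-1) = (PySem.List.pyRange 0 i 1).reverse := by
  rw [PySem.List.pyRange_neg_one_eq_reverse]
  norm_num

-- enumerate filtered by a predicate on (index, value) projects to pyRange filtered
-- through pyGetD
lemma pv_enum_filter (nums : List Int) (p : Int × Int → Bool) :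
    ((PySem.List.enumerate nums).filter p).map Prod.fst =
      ((PySem.List.pyRange 0 (nums.length : Int) 1).filter
        (fun j => p (j, PySem.List.pyGetD nums j 0))) := by
  rw [PySem.List.enumerate_eq_map_pyRange (d := 0), List.filter_map, List.map_map]
  simp [Function.comp_def]

-- ===== VERDICT (by name: the statement is the Claim_ definition above) =====
theorem find_next_bigger_spec : Claim_equal_find_next_bigger := by
  intro i nums _
  unfold Spec_find_next_bigger find_next_bigger find_next_bigger_alt
  by_cases hrange : 0 ≤ i ∧ i < (nums.length : Int)
  · simp only [hrange, not_true_eq_false, if_false]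
    have henum : ∀ p ∈ PySem.List.enumerate nums, 0 ≤ p.1 := by
      intro p hp
      obtain ⟨k, hk, rfl⟩ := (PySem.List.mem_enumerate_iff _ _ _).mp hp
      simp
    rw [pvFold_char i _ _ _ _ henum]
    have hfp : (((PySem.List.enumerate nums).filter (fun p => decide (0 ≤ p.2))).head?.map Prod.fst) =
        ((PySem.List.pyRange 0 (nums.length : Int) 1).filter
          (fun j => decide (0 ≤ PySem.List.pyGetD nums j 0))).head? := by
      rw [← List.head?_map, pv_enum_filter]
    have hnp : (((PySem.List.enumerate nums).filter
          (fun p => decide (0 ≤ p.2) && decide (i < p.1))).head?.map Prod.fst) =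
        ((PySem.List.pyRange (i + 1) (nums.length : Int) 1).filter
          (fun j => decide (0 ≤ PySem.List.pyGetD nums j 0))).head? := by
      rw [← List.head?_map, pv_enum_filter, pv_later_eq nums i _ hrange.1 hrange.2]
    have hln : (((PySem.List.enumerate nums).filter
          (fun p => decide (p.2 < 0) && decide (p.1 < i))).getLast?.map Prod.fst) =
        ((PySem.List.pyRange 0 i 1).filter
          (fun j => decide (PySem.List.pyGetD nums j 0 < 0))).getLast? := by
      rw [← List.getLast?_map, pv_enum_filter, pv_earlier_eq nums i _ hrange.1 (le_of_lt hrange.2)]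
    by_cases hpos : 0 ≤ PySem.List.pyGetD nums i 0
    · simp only [hpos, if_true]
      rw [pvScanGE_eq_filter_head, hnp]
    · simp only [hpos, if_false]
      rw [pvScanLT?_eq_filter_head, pv_countdown_eq i, List.filter_reverse, List.head?_reverse]
      rw [hln, hfp]
      cases hgl : ((PySem.List.pyRange 0 i 1).filter
          (fun j => decide (PySem.List.pyGetD nums j 0 < 0))).getLast? with
      | none => simp [pvScanGE_eq_filter_head]
      | some j =>
        have hjmem : j ∈ (PySem.List.pyRange 0 i 1).filter
            (fun j => decide (PySem.List.pyGetD nums j 0 < 0)) :=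
          List.mem_of_getLast? hgl
        have hjrng := PySem.List.mem_pyRange_one.mp (List.mem_of_mem_filter hjmem)
        have : j ≠ -1 := by omega
        simp [this]
  · simp [hrange]
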